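-- pv_equiv track=rewrite | github.com/godelclaw/ai-agents | atps/scripts/build_partitioned_tables.py | build_cluster_evidence
-- ===== SOURCE A (Python) =====
-- from collections import Counter, defaultdict
--
-- def build_cluster_evidence(training_data, labels):
--     """Build per-cluster, per-axiom evidence counts.
--
--     Returns:
--       cluster_evidence: dict[cluster_id -> dict[axiom -> (pos_count, neg_count)]]
--       cluster_sizes: dict[cluster_id -> int] (number of proved problems in cluster)
--     """
--     cluster_problems = defaultdict(list)
--     for i, entry in enumerate(training_data):
--         cluster_problems[labels[i]].append(entry)
--
--     cluster_evidence = {}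
--     cluster_sizes = {}
--     all_axioms = set()
--
--     for cid, problems in cluster_problems.items():
--         n_proved = len(problems)
--         cluster_sizes[cid] = n_proved
--
--         # Count axiom usage within this cluster
--         axiom_used = Counter()
--         for p in problems:
--             for a in p["used_axioms"]:
--                 axiom_used[a] += 1
--                 all_axioms.add(a)
--
--         # Evidence: (used_count, total_proved - used_count)
--         cluster_evidence[cid] = {}
--         for a, cnt in axiom_used.items():
--             pos = cnt
--             neg = max(0, n_proved - cnt)
--             cluster_evidence[cid][a] = (pos, neg)
--
--     return cluster_evidence, cluster_sizes, all_axioms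
-- ===== SOURCE B (Python) =====
-- def build_cluster_evidence(training_data, labels):
--     """Single streaming pass: maintain running per-cluster sizes and axiom
--     counters (no intermediate cluster_problems lists), then emit evidence."""
--     cluster_sizes = {}
--     counters = {}
--     for i, entry in enumerate(training_data):
--         cid = labels[i]
--         cluster_sizes[cid] = cluster_sizes.get(cid, 0) + 1
--         c = counters.setdefault(cid, {})
--         for a in entry["used_axioms"]:
--             c[a] = c.get(a, 0) + 1
--     cluster_evidence = {
--         cid: {a: (cnt, max(0, cluster_sizes[cid] - cnt)) for a, cnt in c.items()}
--         for cid, c in counters.items()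
--     }
--     all_axioms = set()
--     for c in counters.values():
--         all_axioms.update(c)
--     return cluster_evidence, cluster_sizes, all_axioms
-- ===== Notes on version B (the rewrite author's own statement) =====
-- stated objective: alternative
-- what changed: Replaces group-entries-into-per-cluster-lists-then-recount with a single streaming pass that maintains running per-cluster sizes and per-cluster axiom counters (the intermediate cluster_problems lists disappear), deriving all_axioms from the counters afterwards.
import Mathlib
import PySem

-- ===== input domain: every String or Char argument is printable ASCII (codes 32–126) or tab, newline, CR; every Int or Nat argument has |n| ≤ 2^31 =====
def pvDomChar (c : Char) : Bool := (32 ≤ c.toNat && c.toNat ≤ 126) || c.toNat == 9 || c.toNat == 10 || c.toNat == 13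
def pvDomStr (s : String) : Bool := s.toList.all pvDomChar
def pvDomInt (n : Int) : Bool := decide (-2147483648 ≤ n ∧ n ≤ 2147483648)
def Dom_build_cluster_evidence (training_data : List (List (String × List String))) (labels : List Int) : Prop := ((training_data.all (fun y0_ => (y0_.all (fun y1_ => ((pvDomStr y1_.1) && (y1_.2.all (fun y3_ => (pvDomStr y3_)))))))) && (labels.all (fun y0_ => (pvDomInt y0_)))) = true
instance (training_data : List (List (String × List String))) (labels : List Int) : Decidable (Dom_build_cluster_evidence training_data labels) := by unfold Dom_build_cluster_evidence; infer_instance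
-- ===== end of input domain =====

-- B replaces group-into-lists-then-recount by one streaming pass keeping running per-cluster sizes and axiom counters (objective: alternative decomposition, not claimed faster).
-- Side effects: neither version mutates its arguments.

-- ===== PORT A =====
-- shared accessors: labels[i] (exact under Pre_: i in range) and entry["used_axioms"]
-- (first-match association-list lookup; exact under Pre_: key present)
def pvCid (labels : List Int) (i : Int) : Int := PySem.List.pyGetD labels i 0
def pvAx (p : List (String × List String)) : List String :=
  (PySem.Dict.mk p).getD "used_axioms" []

def build_cluster_evidence (training_data : List (List (String × List String))) (labels : List Int) : (List (Int × List (String × Int × Int))) × (List (Int × Int)) × List String :=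
  -- cluster_problems = defaultdict(list); for i, entry in enumerate(...): cluster_problems[labels[i]].append(entry)
  let cluster_problems : PySem.Dict Int (List (List (String × List String))) :=
    (PySem.List.enumerate training_data).foldl
      (fun d ie => d.modify (pvCid labels ie.1) [] (fun l => l ++ [ie.2])) PySem.Dict.empty
  -- for cid, problems in cluster_problems.items(): ...
  let res :=
    cluster_problems.items.foldl
      (fun (st : PySem.Dict Int (PySem.Dict String (Int × Int)) × PySem.Dict Int Int × PySem.Set String) cp =>
        let n_proved : Int := (cp.2.length : Int)
        let sizes := st.2.1.insert cp.1 n_proved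
        -- axiom_used = Counter(); for p in problems: for a in p["used_axioms"]: axiom_used[a] += 1; all_axioms.add(a)
        let cs :=
          cp.2.foldl
            (fun (st2 : PySem.Dict String Int × PySem.Set String) p =>
              (pvAx p).foldl (fun st3 a => (st3.1.modify a 0 (· + 1), PySem.Set.add st3.2 a)) st2)
            (PySem.Dict.empty, st.2.2)
        -- cluster_evidence[cid] = {}; for a, cnt in axiom_used.items(): cluster_evidence[cid][a] = (cnt, max(0, n_proved - cnt))
        let ev := cs.1.items.foldl
          (fun (e : PySem.Dict String (Int × Int)) ac => e.insert ac.1 (ac.2, max 0 (n_proved - ac.2)))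
          PySem.Dict.empty
        (st.1.insert cp.1 ev, sizes, cs.2))
      (PySem.Dict.empty, PySem.Dict.empty, PySem.Set.empty)
  (res.1.items.map (fun q => (q.1, q.2.items)), res.2.1.items, res.2.2)

-- ===== PORT B =====
def build_cluster_evidence_alt (training_data : List (List (String × List String))) (labels : List Int) : (List (Int × List (String × Int × Int))) × (List (Int × Int)) × List String :=
  -- single pass: cluster_sizes[cid] = cluster_sizes.get(cid, 0) + 1;
  -- c = counters.setdefault(cid, {}) mutated in place == modify at cid
  let st :=
    (PySem.List.enumerate training_data).foldl
      (fun (st : PySem.Dict Int Int × PySem.Dict Int (PySem.Dict String Int)) ie =>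
        (st.1.modify (pvCid labels ie.1) 0 (· + 1),
         st.2.modify (pvCid labels ie.1) PySem.Dict.empty
           (fun c => (pvAx ie.2).foldl (fun c a => c.modify a 0 (· + 1)) c)))
      (PySem.Dict.empty, PySem.Dict.empty)
  -- the two dict comprehensions (distinct keys) emitted directly as items lists
  let ce := st.2.items.map (fun cp =>
      (cp.1, cp.2.items.map (fun ac => (ac.1, (ac.2, max 0 (st.1.getD cp.1 0 - ac.2))))))
  -- all_axioms = set(); for c in counters.values(): all_axioms.update(c)
  let all := st.2.values.foldl (fun s c => PySem.Set.update s c.keys) PySem.Set.empty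
  (ce, st.1.items, all)

-- ===== PRECONDITION & SPEC =====
-- Pre_ excludes exactly where the Python A raises: labels shorter than training_data
-- (IndexError on labels[i]) or an entry without the "used_axioms" key (KeyError).
def Pre_build_cluster_evidence (training_data : List (List (String × List String))) (labels : List Int) : Prop :=
  training_data.length ≤ labels.length ∧
  ∀ p ∈ training_data, "used_axioms" ∈ p.map Prod.fst
instance (training_data : List (List (String × List String))) (labels : List Int) : Decidable (Pre_build_cluster_evidence training_data labels) := by unfold Pre_build_cluster_evidence; infer_instance

def pvWitness_build_cluster_evidence : (List (List (String × List String))) × List Int :=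
  ([[("used_axioms", ["a1", "a2"])], [("used_axioms", ["a2"])]], [0, 1])

def Spec_build_cluster_evidence (training_data : List (List (String × List String))) (labels : List Int) (out : (List (Int × List (String × Int × Int))) × (List (Int × Int)) × List String) : Prop := out = build_cluster_evidence_alt training_data labels
instance (training_data : List (List (String × List String))) (labels : List Int) (out : (List (Int × List (String × Int × Int))) × (List (Int × Int)) × List String) : Decidable (Spec_build_cluster_evidence training_data labels out) := by unfold Spec_build_cluster_evidence; infer_instance

-- ===== CLAIM (what is proved, stated in full; the proofs are below) =====
def Claim_equal_build_cluster_evidence : Prop := ∀ (training_data : List (List (String × List String))) (labels : List Int), Dom_build_cluster_evidence training_data labels → Pre_build_cluster_evidence training_data labels → Spec_build_cluster_evidence training_data labels (build_cluster_evidence training_data labels)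

-- ===== LEMMAS AND PROOFS =====

-- the stream of (cluster id, entry) pairs both programs process, and derived data
def pvE (training_data : List (List (String × List String))) (labels : List Int) : List (Int × List (String × List String)) :=
  (PySem.List.enumerate training_data).map (fun ie => (pvCid labels ie.1, ie.2))
def pvK (training_data : List (List (String × List String))) (labels : List Int) : List Int :=
  PySem.Set.ofList ((pvE training_data labels).map Prod.fst)
def pvFlat (training_data : List (List (String × List String))) (labels : List Int) (c : Int) : List String :=
  ((pvE training_data labels).filter (fun p => p.1 == c)).flatMap (fun p => pvAx p.2)
def pvCnt (training_data : List (List (String × List String))) (labels : List Int) (c : Int) : Int :=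
  (List.count c ((pvE training_data labels).map Prod.fst) : Int)

-- the common canonical value both ports are shown to equal
def pvCanon (training_data : List (List (String × List String))) (labels : List Int) : (List (Int × List (String × Int × Int))) × (List (Int × Int)) × List String :=
  ((pvK training_data labels).map (fun c =>
      (c, (PySem.Dict.counter (pvFlat training_data labels c)).items.map
            (fun ac => (ac.1, (ac.2, max 0 (pvCnt training_data labels c - ac.2)))))),
   (pvK training_data labels).map (fun c => (c, pvCnt training_data labels c)),
   (pvK training_data labels).foldl (fun s c => PySem.Set.update s (pvFlat training_data labels c)) [])

lemma pv_axfold_split (as : List String) (d : PySem.Dict String Int) (s : PySem.Set String) :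
    as.foldl (fun st3 a => (st3.1.modify a 0 (· + 1), PySem.Set.add st3.2 a)) (d, s)
      = (as.foldl (fun d a => d.modify a 0 (· + 1)) d, PySem.Set.update s as) := by
  exact (PySem.List.foldl_prod_mk (fun (x : PySem.Dict String Int) (a : String) => x.modify a 0 (· + 1))
    (fun (s : PySem.Set String) (a : String) => PySem.Set.add s a) as d s).trans rfl

lemma pv_probfold_split (ps : List (List (String × List String))) (d : PySem.Dict String Int) (s : PySem.Set String) :
    ps.foldl
      (fun (st2 : PySem.Dict String Int × PySem.Set String) p =>
        (pvAx p).foldl (fun st3 a => (st3.1.modify a 0 (· + 1), PySem.Set.add st3.2 a)) st2) (d, s)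
      = (ps.foldl (fun d p => (pvAx p).foldl (fun d a => d.modify a 0 (· + 1)) d) d,
         PySem.Set.update s (ps.flatMap pvAx)) := by
  induction ps generalizing d s with
  | nil => rfl
  | cons p ps ih =>
    simp only [List.foldl_cons, pv_axfold_split, ih, List.flatMap_cons, PySem.Set.update_append]

lemma pv_ctrfold_flat (ps : List (List (String × List String))) (d : PySem.Dict String Int) :
    ps.foldl (fun d p => (pvAx p).foldl (fun d a => d.modify a 0 (· + 1)) d) d
      = (ps.flatMap pvAx).foldl (fun d a => d.modify a 0 (· + 1)) d := by
  induction ps generalizing d with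
  | nil => rfl
  | cons p ps ih => simp only [List.foldl_cons, ih, List.flatMap_cons, List.foldl_append]

def pvEvA (cp : Int × List (List (String × List String))) : PySem.Dict String (Int × Int) :=
  (PySem.Dict.counter (cp.2.flatMap pvAx)).items.foldl
    (fun (e : PySem.Dict String (Int × Int)) ac => e.insert ac.1 (ac.2, max 0 ((cp.2.length : Int) - ac.2)))
    PySem.Dict.empty

lemma pv_Astep_eq :
    (fun (st : PySem.Dict Int (PySem.Dict String (Int × Int)) × PySem.Dict Int Int × PySem.Set String)
         (cp : Int × List (List (String × List String))) =>
        (st.1.insert cp.1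
           (List.foldl (fun (e : PySem.Dict String (Int × Int)) ac => e.insert ac.1 (ac.2, max 0 ((cp.2.length : Int) - ac.2)))
             PySem.Dict.empty
             (List.foldl
               (fun (st2 : PySem.Dict String Int × PySem.Set String) p =>
                 List.foldl (fun st3 a => (st3.1.modify a 0 (· + 1), PySem.Set.add st3.2 a)) st2 (pvAx p))
               (PySem.Dict.empty, st.2.2) cp.2).1.items),
         st.2.1.insert cp.1 ((cp.2.length : Int)),
         (List.foldl
           (fun (st2 : PySem.Dict String Int × PySem.Set String) p =>
             List.foldl (fun st3 a => (st3.1.modify a 0 (· + 1), PySem.Set.add st3.2 a)) st2 (pvAx p))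
           (PySem.Dict.empty, st.2.2) cp.2).2))
      = (fun st cp =>
          (st.1.insert cp.1 (pvEvA cp), st.2.1.insert cp.1 ((cp.2.length : Int)),
           PySem.Set.update st.2.2 (cp.2.flatMap pvAx))) := by
  funext st cp
  simp only [pv_probfold_split, pv_ctrfold_flat, pvEvA, PySem.Dict.counter_eq_foldl]

lemma pv_outer_split (l : List (Int × List (List (String × List String))))
    (d1 : PySem.Dict Int (PySem.Dict String (Int × Int))) (d2 : PySem.Dict Int Int) (s : PySem.Set String) :
    l.foldl
      (fun (st : PySem.Dict Int (PySem.Dict String (Int × Int)) × PySem.Dict Int Int × PySem.Set String) cp =>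
        (st.1.insert cp.1 (pvEvA cp), st.2.1.insert cp.1 ((cp.2.length : Int)),
         PySem.Set.update st.2.2 (cp.2.flatMap pvAx))) (d1, d2, s)
      = (l.foldl (fun d cp => d.insert cp.1 (pvEvA cp)) d1,
         l.foldl (fun d cp => d.insert cp.1 ((cp.2.length : Int))) d2,
         l.foldl (fun s cp => PySem.Set.update s (cp.2.flatMap pvAx)) s) := by
  induction l generalizing d1 d2 s with
  | nil => rfl
  | cons cp l ih => exact ih _ _ _

lemma pv_b_ctr_getD (l : List (Int × List String)) (d : PySem.Dict Int (PySem.Dict String Int)) (c : Int) :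
    (l.foldl (fun d p => d.modify p.1 PySem.Dict.empty
        (fun x => p.2.foldl (fun c a => c.modify a 0 (· + 1)) x)) d).getD c PySem.Dict.empty
      = ((l.filter (fun p => p.1 == c)).flatMap Prod.snd).foldl
          (fun x a => x.modify a 0 (· + 1)) (d.getD c PySem.Dict.empty) := by
  induction l generalizing d with
  | nil => rfl
  | cons p l ih =>
    simp only [List.foldl_cons, ih, List.filter_cons]
    by_cases h : p.1 = c
    · subst h
      simp [PySem.Dict.getD_modify_self, List.foldl_append]
    · have hb : (p.1 == c) = false := by simp [h]
      simp [hb, PySem.Dict.getD_modify_of_ne _ _ _ (Ne.symm h)]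

lemma pv_update_ofList {s : PySem.Set String} {xs : List String} :
    PySem.Set.update s (PySem.Set.ofList xs) = PySem.Set.update s xs := by
  rw [PySem.Set.update_eq_append_filter, PySem.Set.update_eq_append_filter, PySem.Set.ofList_ofList]

def pvE2 (training_data : List (List (String × List String))) (labels : List Int) : List (Int × List String) :=
  (pvE training_data labels).map (fun p => (p.1, pvAx p.2))

lemma pv_flat_map_snd (training_data : List (List (String × List String))) (labels : List Int) (c : Int) :
    (((pvE training_data labels).filter (fun p => p.1 == c)).map (fun p => p.2)).flatMap pvAx
      = pvFlat training_data labels c := by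
  simp [pvFlat, List.flatMap_map]

lemma pv_len_probs (training_data : List (List (String × List String))) (labels : List Int) (c : Int) :
    (((pvE training_data labels).filter (fun p => p.1 == c)).length : Int)
      = pvCnt training_data labels c := by
  have h : ((pvE training_data labels).filter (fun p => p.1 == c)).length
      = List.count c ((pvE training_data labels).map Prod.fst) := by
    rw [List.count_eq_countP, List.countP_map, List.countP_eq_length_filter]
    rfl
  simp [pvCnt, h]

lemma pv_evA_items (cp : Int × List (List (String × List String))) :
    (pvEvA cp).items = (PySem.Dict.counter (cp.2.flatMap pvAx)).items.map
      (fun ac => (ac.1, (ac.2, max 0 ((cp.2.length : Int) - ac.2)))) := by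
  have h := PySem.Dict.items_foldl_insert_fresh (PySem.Dict.counter (cp.2.flatMap pvAx)).items
    (fun ac => ac.1) (fun ac => (ac.2, max 0 ((cp.2.length : Int) - ac.2))) PySem.Dict.empty
    (fun a _ => PySem.Dict.contains_empty _) (PySem.Dict.nodup_keys_counter _)
  simpa [pvEvA] using h

lemma pv_canon_A (training_data : List (List (String × List String))) (labels : List Int) :
    build_cluster_evidence training_data labels = pvCanon training_data labels := by
  have hG : (PySem.List.enumerate training_data).foldl
      (fun d ie => d.modify (pvCid labels ie.1) [] (fun l => l ++ [ie.2])) PySem.Dict.empty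
      = (pvE training_data labels).foldl
          (fun d p => d.modify p.1 [] (fun l => l ++ [p.2])) PySem.Dict.empty := by
    rw [pvE, List.foldl_map]
  set G := (pvE training_data labels).foldl
      (fun d p => d.modify p.1 [] (fun l => l ++ [p.2])) PySem.Dict.empty with hGdef
  have hkeys : G.keys = pvK training_data labels := by
    rw [hGdef]
    exact (PySem.Dict.keys_foldl_modify_key (pvE training_data labels) Prod.fst []
      (fun _ p => (fun l => l ++ [p.2])) PySem.Dict.empty).trans
      (by rw [PySem.Dict.keys_empty, PySem.Set.update_nil_left, pvK])
  have hnodup : G.keys.Nodup := by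
    rw [hGdef]
    exact PySem.Dict.nodup_keys_foldl_modify_key (pvE training_data labels) Prod.fst []
      (fun _ p => (fun l => l ++ [p.2])) PySem.Dict.empty PySem.Dict.nodup_keys_empty
  have hgetD : ∀ c, G.getD c [] = ((pvE training_data labels).filter (fun p => p.1 == c)).map (fun p => p.2) := by
    intro c
    rw [hGdef]
    exact (PySem.Dict.getD_foldl_modify_append (pvE training_data labels) PySem.Dict.empty c).trans
      (by simp [PySem.Dict.getD_empty])
  have hitems : G.items = (pvK training_data labels).map
      (fun c => (c, ((pvE training_data labels).filter (fun p => p.1 == c)).map (fun p => p.2))) := by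
    rw [PySem.Dict.items_eq_map_keys G hnodup [], hkeys]
    exact List.map_congr_left (fun c _ => by rw [hgetD c])
  have h1 : (G.items.foldl (fun d cp => d.insert cp.1 (pvEvA cp)) PySem.Dict.empty).items
      = G.items.map (fun cp => (cp.1, pvEvA cp)) := by
    have h := PySem.Dict.items_foldl_insert_fresh G.items (fun cp => cp.1) (fun cp => pvEvA cp)
      PySem.Dict.empty (fun a _ => PySem.Dict.contains_empty _) hnodup
    simpa using h
  have h2 : (G.items.foldl (fun d cp => d.insert cp.1 ((cp.2.length : Int))) PySem.Dict.empty).items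
      = G.items.map (fun cp => (cp.1, (cp.2.length : Int))) := by
    have h := PySem.Dict.items_foldl_insert_fresh G.items (fun cp => cp.1)
      (fun cp => ((cp.2.length : Int))) PySem.Dict.empty (fun a _ => PySem.Dict.contains_empty _) hnodup
    simpa using h
  show (List.map (fun q => (q.1, q.2.items))
      (List.foldl
        (fun (st : PySem.Dict Int (PySem.Dict String (Int × Int)) × PySem.Dict Int Int × PySem.Set String) cp =>
          (st.1.insert cp.1
             (List.foldl (fun (e : PySem.Dict String (Int × Int)) ac => e.insert ac.1 (ac.2, max 0 ((cp.2.length : Int) - ac.2)))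
               PySem.Dict.empty
               (List.foldl
                 (fun (st2 : PySem.Dict String Int × PySem.Set String) p =>
                   List.foldl (fun st3 a => (st3.1.modify a 0 (· + 1), PySem.Set.add st3.2 a)) st2 (pvAx p))
                 (PySem.Dict.empty, st.2.2) cp.2).1.items),
           st.2.1.insert cp.1 ((cp.2.length : Int)),
           (List.foldl
             (fun (st2 : PySem.Dict String Int × PySem.Set String) p =>
               List.foldl (fun st3 a => (st3.1.modify a 0 (· + 1), PySem.Set.add st3.2 a)) st2 (pvAx p))
             (PySem.Dict.empty, st.2.2) cp.2).2))
        (PySem.Dict.empty, PySem.Dict.empty, PySem.Set.empty)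
        (List.foldl (fun d ie => d.modify (pvCid labels ie.1) [] (fun l => l ++ [ie.2]))
          PySem.Dict.empty (PySem.List.enumerate training_data)).items).1.items,
      (List.foldl
        (fun (st : PySem.Dict Int (PySem.Dict String (Int × Int)) × PySem.Dict Int Int × PySem.Set String) cp =>
          (st.1.insert cp.1
             (List.foldl (fun (e : PySem.Dict String (Int × Int)) ac => e.insert ac.1 (ac.2, max 0 ((cp.2.length : Int) - ac.2)))
               PySem.Dict.empty
               (List.foldl
                 (fun (st2 : PySem.Dict String Int × PySem.Set String) p =>
                   List.foldl (fun st3 a => (st3.1.modify a 0 (· + 1), PySem.Set.add st3.2 a)) st2 (pvAx p))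
                 (PySem.Dict.empty, st.2.2) cp.2).1.items),
           st.2.1.insert cp.1 ((cp.2.length : Int)),
           (List.foldl
             (fun (st2 : PySem.Dict String Int × PySem.Set String) p =>
               List.foldl (fun st3 a => (st3.1.modify a 0 (· + 1), PySem.Set.add st3.2 a)) st2 (pvAx p))
             (PySem.Dict.empty, st.2.2) cp.2).2))
        (PySem.Dict.empty, PySem.Dict.empty, PySem.Set.empty)
        (List.foldl (fun d ie => d.modify (pvCid labels ie.1) [] (fun l => l ++ [ie.2]))
          PySem.Dict.empty (PySem.List.enumerate training_data)).items).2.1.items,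
      (List.foldl
        (fun (st : PySem.Dict Int (PySem.Dict String (Int × Int)) × PySem.Dict Int Int × PySem.Set String) cp =>
          (st.1.insert cp.1
             (List.foldl (fun (e : PySem.Dict String (Int × Int)) ac => e.insert ac.1 (ac.2, max 0 ((cp.2.length : Int) - ac.2)))
               PySem.Dict.empty
               (List.foldl
                 (fun (st2 : PySem.Dict String Int × PySem.Set String) p =>
                   List.foldl (fun st3 a => (st3.1.modify a 0 (· + 1), PySem.Set.add st3.2 a)) st2 (pvAx p))
                 (PySem.Dict.empty, st.2.2) cp.2).1.items),
           st.2.1.insert cp.1 ((cp.2.length : Int)),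
           (List.foldl
             (fun (st2 : PySem.Dict String Int × PySem.Set String) p =>
               List.foldl (fun st3 a => (st3.1.modify a 0 (· + 1), PySem.Set.add st3.2 a)) st2 (pvAx p))
             (PySem.Dict.empty, st.2.2) cp.2).2))
        (PySem.Dict.empty, PySem.Dict.empty, PySem.Set.empty)
        (List.foldl (fun d ie => d.modify (pvCid labels ie.1) [] (fun l => l ++ [ie.2]))
          PySem.Dict.empty (PySem.List.enumerate training_data)).items).2.2)
      = pvCanon training_data labels
  rw [hG, pv_Astep_eq, pv_outer_split, h1, h2]
  simp only [pvCanon, hitems, List.map_map, List.foldl_map, Prod.mk.injEq]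
  refine ⟨?_, ?_, ?_⟩
  · refine List.map_congr_left (fun c _ => ?_)
    simp [Function.comp, pv_evA_items, pv_flat_map_snd, pv_len_probs]
  · refine List.map_congr_left (fun c _ => ?_)
    simp [Function.comp, pv_len_probs]
  · refine PySem.List.foldl_congr_mem _ _ _ _ (fun acc c _ => ?_)
    rw [pv_flat_map_snd]

lemma pv_canon_B (training_data : List (List (String × List String))) (labels : List Int) :
    build_cluster_evidence_alt training_data labels = pvCanon training_data labels := by
  have hst : (PySem.List.enumerate training_data).foldl
      (fun (st : PySem.Dict Int Int × PySem.Dict Int (PySem.Dict String Int)) ie =>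
        (st.1.modify (pvCid labels ie.1) 0 (· + 1),
         st.2.modify (pvCid labels ie.1) PySem.Dict.empty
           (fun c => (pvAx ie.2).foldl (fun c a => c.modify a 0 (· + 1)) c)))
      (PySem.Dict.empty, PySem.Dict.empty)
      = ((PySem.List.enumerate training_data).foldl
           (fun d ie => d.modify (pvCid labels ie.1) 0 (· + 1)) PySem.Dict.empty,
         (PySem.List.enumerate training_data).foldl
           (fun (d : PySem.Dict Int (PySem.Dict String Int)) ie => d.modify (pvCid labels ie.1) PySem.Dict.empty
             (fun c => (pvAx ie.2).foldl (fun c a => c.modify a 0 (· + 1)) c)) PySem.Dict.empty) :=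
    PySem.List.foldl_prod_mk
      (fun (d : PySem.Dict Int Int) ie => d.modify (pvCid labels ie.1) 0 (· + 1))
      (fun (d : PySem.Dict Int (PySem.Dict String Int)) ie =>
        d.modify (pvCid labels ie.1) PySem.Dict.empty
          (fun c => (pvAx ie.2).foldl (fun c a => c.modify a 0 (· + 1)) c))
      (PySem.List.enumerate training_data) PySem.Dict.empty PySem.Dict.empty
  have hs1 : (PySem.List.enumerate training_data).foldl
      (fun d ie => d.modify (pvCid labels ie.1) 0 (· + 1)) PySem.Dict.empty
      = PySem.Dict.counter ((pvE training_data labels).map Prod.fst) := by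
    simp [PySem.Dict.counter_eq_foldl, pvE, List.map_map, List.foldl_map, Function.comp]
  set s2 := (PySem.List.enumerate training_data).foldl
      (fun (d : PySem.Dict Int (PySem.Dict String Int)) ie => d.modify (pvCid labels ie.1) PySem.Dict.empty
        (fun c => (pvAx ie.2).foldl (fun c a => c.modify a 0 (· + 1)) c)) PySem.Dict.empty with hs2def
  have hs2keys : s2.keys = pvK training_data labels := by
    rw [hs2def]
    refine (PySem.Dict.keys_foldl_modify_key (PySem.List.enumerate training_data)
      (fun ie => pvCid labels ie.1) PySem.Dict.empty
      (fun _ ie => fun c => (pvAx ie.2).foldl (fun c a => c.modify a 0 (· + 1)) c)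
      PySem.Dict.empty).trans ?_
    rw [PySem.Dict.keys_empty, PySem.Set.update_nil_left, pvK, pvE, List.map_map]
    rfl
  have hs2nodup : s2.keys.Nodup := by
    rw [hs2def]
    exact PySem.Dict.nodup_keys_foldl_modify_key (PySem.List.enumerate training_data)
      (fun ie => pvCid labels ie.1) PySem.Dict.empty
      (fun _ ie => fun c => (pvAx ie.2).foldl (fun c a => c.modify a 0 (· + 1)) c)
      PySem.Dict.empty PySem.Dict.nodup_keys_empty
  have hfold2 : s2 = (pvE2 training_data labels).foldl
      (fun d p => d.modify p.1 PySem.Dict.empty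
        (fun x => p.2.foldl (fun c a => c.modify a 0 (· + 1)) x)) PySem.Dict.empty := by
    rw [hs2def]
    simp [pvE2, pvE, List.map_map, List.foldl_map, Function.comp]
  have hs2getD : ∀ c, s2.getD c PySem.Dict.empty = PySem.Dict.counter (pvFlat training_data labels c) := by
    intro c
    rw [hfold2, pv_b_ctr_getD]
    simp only [pvE2, List.filter_map, List.flatMap_map, pvFlat, PySem.Dict.counter_eq_foldl,
      PySem.Dict.getD_empty]
    rfl
  have hs2items : s2.items = (pvK training_data labels).map
      (fun c => (c, PySem.Dict.counter (pvFlat training_data labels c))) := by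
    rw [PySem.Dict.items_eq_map_keys s2 hs2nodup PySem.Dict.empty, hs2keys]
    exact List.map_congr_left (fun c _ => by rw [hs2getD c])
  have hs2values : s2.values = (pvK training_data labels).map
      (fun c => PySem.Dict.counter (pvFlat training_data labels c)) := by
    rw [PySem.Dict.values_eq_map_keys s2 hs2nodup PySem.Dict.empty, hs2keys]
    exact List.map_congr_left (fun c _ => by rw [hs2getD c])
  show (List.map (fun cp => (cp.1, List.map (fun ac => (ac.1, (ac.2, max 0
        ((((PySem.List.enumerate training_data).foldl
            (fun (st : PySem.Dict Int Int × PySem.Dict Int (PySem.Dict String Int)) ie =>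
              (st.1.modify (pvCid labels ie.1) 0 (· + 1),
               st.2.modify (pvCid labels ie.1) PySem.Dict.empty
                 (fun c => (pvAx ie.2).foldl (fun c a => c.modify a 0 (· + 1)) c)))
            (PySem.Dict.empty, PySem.Dict.empty)).1.getD cp.1 0) - ac.2)))) cp.2.items))
      ((PySem.List.enumerate training_data).foldl
        (fun (st : PySem.Dict Int Int × PySem.Dict Int (PySem.Dict String Int)) ie =>
          (st.1.modify (pvCid labels ie.1) 0 (· + 1),
           st.2.modify (pvCid labels ie.1) PySem.Dict.empty
             (fun c => (pvAx ie.2).foldl (fun c a => c.modify a 0 (· + 1)) c)))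
        (PySem.Dict.empty, PySem.Dict.empty)).2.items,
      ((PySem.List.enumerate training_data).foldl
        (fun (st : PySem.Dict Int Int × PySem.Dict Int (PySem.Dict String Int)) ie =>
          (st.1.modify (pvCid labels ie.1) 0 (· + 1),
           st.2.modify (pvCid labels ie.1) PySem.Dict.empty
             (fun c => (pvAx ie.2).foldl (fun c a => c.modify a 0 (· + 1)) c)))
        (PySem.Dict.empty, PySem.Dict.empty)).1.items,
      List.foldl (fun s c => PySem.Set.update s c.keys) PySem.Set.empty
        ((PySem.List.enumerate training_data).foldl
          (fun (st : PySem.Dict Int Int × PySem.Dict Int (PySem.Dict String Int)) ie =>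
            (st.1.modify (pvCid labels ie.1) 0 (· + 1),
             st.2.modify (pvCid labels ie.1) PySem.Dict.empty
               (fun c => (pvAx ie.2).foldl (fun c a => c.modify a 0 (· + 1)) c)))
          (PySem.Dict.empty, PySem.Dict.empty)).2.values)
      = pvCanon training_data labels
  rw [hst, hs1]
  simp only [pvCanon, hs2items, hs2values, List.map_map, List.foldl_map, Prod.mk.injEq]
  refine ⟨?_, ?_, ?_⟩
  · refine List.map_congr_left (fun c _ => ?_)
    simp only [PySem.Dict.getD_counter, pvCnt]
    rfl
  · simp only [PySem.Dict.items_counter, pvK, pvCnt]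
  · refine PySem.List.foldl_congr_mem _ _ _ _ (fun acc c _ => ?_)
    rw [PySem.Dict.keys_counter, pv_update_ofList]

-- ===== VERDICT (by name: the statement is the Claim_ definition above) =====
theorem build_cluster_evidence_spec : Claim_equal_build_cluster_evidence := by
  intro training_data labels _ _
  unfold Spec_build_cluster_evidence
  rw [pv_canon_A, pv_canon_B]
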